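-- pv_equiv track=rewrite | github.com/mit1221/Social-Networks | network_functions.py | get_families
-- ===== SOURCE A (Python) =====
-- from typing import List, Tuple, Dict, TextIO
--
-- def get_families(person_to_friends: Dict[str, List[str]]) -> Dict[str, \
--                                                                   List[str]]:
--     """Return a "last name to first names" dictionary based on the given
--     "person to friends" dictionary.
--
--     >>> dict1 = {'Mit Kapadia': ['Alexander Jonckers', 'Jacob Brown', \
--     'Jay Kapadia', 'John Ventura'], 'John Ventura': ['Gamila Jonckers', \
--     'Rachel Lawerenz']}
--     >>> get_families(dict1)
--     {'Kapadia': ['Jay', 'Mit'], 'Jonckers': ['Alexander', 'Gamila'], 'Brown': \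
-- ['Jacob'], 'Ventura': ['John'], 'Lawerenz': ['Rachel']}
--     """
--     lastname_to_firstname = {}
--
--     for person in person_to_friends:
--         firstname = person[:person.rfind(' ')]
--         lastname = person[person.rfind(' ') + 1:]
--
--         create_key_value_pairs(lastname_to_firstname, lastname, firstname)
--
--         for friend in person_to_friends[person]:
--             firstname = friend[:friend.rfind(' ')]
--             lastname = friend[friend.rfind(' ') + 1:]
--
--             create_key_value_pairs(lastname_to_firstname, lastname, firstname)
--
--     sort_values(lastname_to_firstname)
--
--     return lastname_to_firstname
--
-- def create_key_value_pairs(dictionary: Dict[str, List[str]], key: str, \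
--                            value: str) -> None:
--     """Make a new key-value pair in dictionary with key and value, where all
--     the values in dictionary are of type list.
--
--     >>> d = {}
--     >>> create_key_value_pairs(d, 'Chess Club', 'Mit Kapadia')
--     >>> d
--     {'Chess Club': ['Mit Kapadia']}
--     >>> create_key_value_pairs(d, 'Chess Club', 'John Ventura')
--     >>> d
--     {'Chess Club': ['Mit Kapadia', 'John Ventura']}
--     """
--     if key not in dictionary:
--         dictionary[key] = []
--     if value not in dictionary[key]:
--         dictionary[key].append(value)
--
-- def sort_values(dictionary_to_sort: Dict[str, List[str]]) -> None:
--     """Sort the values in dictionary_to_sort alphabetically.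
--
--     >>> d = {'Parent Association': ['Gloria Pritchett', \
--     'Claire Dunphy'], 'Chess Club': ['Manny Delgado', 'Alex Dunphy']}
--     >>> sort_values(d)
--     >>> d
--     {'Parent Association': ['Claire Dunphy', 'Gloria Pritchett'], \
-- 'Chess Club': ['Alex Dunphy', 'Manny Delgado']}
--     """
--     for key in dictionary_to_sort:
--         dictionary_to_sort[key].sort()
-- ===== SOURCE B (Python) =====
-- def get_families(person_to_friends):
--     names = []
--     for person, friends in person_to_friends.items():
--         names.append(person)
--         names.extend(friends)
--     pairs = []
--     for name in names:
--         i = name.rfind(' ')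
--         pairs.append((name[:i], name[i + 1:]))
--     result = {}
--     for _, lastname in pairs:
--         if lastname not in result:
--             result[lastname] = []
--     for firstname, lastname in sorted(pairs, key=lambda p: p[0]):
--         if firstname not in result[lastname]:
--             result[lastname].append(firstname)
--     return result
-- ===== Notes on version B (the rewrite author's own statement) =====
-- stated objective: alternative
-- what changed: Instead of inserting each first name into its last-name bucket during traversal and then sorting every bucket, B parses all names into (first,last) pairs, sorts that single pair list by first name once, and fills the buckets in one pass so each bucket is produced already sorted with no per-bucket sort.
import Mathlib
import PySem

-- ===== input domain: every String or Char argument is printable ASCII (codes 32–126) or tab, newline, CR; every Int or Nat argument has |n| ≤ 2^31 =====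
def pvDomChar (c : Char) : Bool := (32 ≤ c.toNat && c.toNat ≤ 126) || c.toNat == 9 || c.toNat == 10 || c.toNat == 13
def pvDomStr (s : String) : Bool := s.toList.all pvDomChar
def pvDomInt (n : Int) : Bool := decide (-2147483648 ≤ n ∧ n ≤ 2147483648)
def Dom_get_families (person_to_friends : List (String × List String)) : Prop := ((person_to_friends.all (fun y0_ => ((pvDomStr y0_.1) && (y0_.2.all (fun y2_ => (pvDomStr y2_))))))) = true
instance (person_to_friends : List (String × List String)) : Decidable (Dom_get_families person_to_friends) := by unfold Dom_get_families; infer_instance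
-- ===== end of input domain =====

-- B replaces A's per-bucket insert-then-sort with: parse all names once, sort the
-- (first, last) pairs once by first name, and fill the buckets in one pass, so each
-- bucket comes out already sorted (objective: alternative decomposition, not speed).

-- ===== PORT A =====
-- shared by both ports: firstname = name[:name.rfind(' ')], lastname = name[name.rfind(' ')+1:]
def pvSplitName (name : String) : String × String :=
  (PySem.Str.slice name none (some (PySem.Str.rfind name " ")),
   PySem.Str.slice name (some (PySem.Str.rfind name " " + 1)) none)

def create_key_value_pairs (dictionary : PySem.Dict String (List String)) (key value : String) :
    PySem.Dict String (List String) :=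
  let d := if dictionary.contains key then dictionary else dictionary.insert key []
  if value ∈ d.getD key [] then d else d.modify key [] (· ++ [value])

def sort_values (d : PySem.Dict String (List String)) : PySem.Dict String (List String) :=
  PySem.Dict.mk (d.items.map (fun p => (p.1, PySem.List.sorted p.2 (fun x => x) false)))

def get_families (person_to_friends : List (String × List String)) : List (String × List String) :=
  let d := person_to_friends.foldl (fun d pr =>
      let fl := pvSplitName pr.1
      let d := create_key_value_pairs d fl.2 fl.1
      pr.2.foldl (fun d friend =>
          let fl2 := pvSplitName friend
          create_key_value_pairs d fl2.2 fl2.1) d)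
    PySem.Dict.empty
  (sort_values d).items

-- ===== PORT B =====
def get_families_alt (person_to_friends : List (String × List String)) : List (String × List String) :=
  let names := person_to_friends.foldl (fun acc pr => (acc ++ [pr.1]) ++ pr.2) []
  let pairs := names.foldl (fun acc name => acc ++ [pvSplitName name]) []
  let result := pairs.foldl (fun d p => if d.contains p.2 then d else d.insert p.2 []) PySem.Dict.empty
  let result := (PySem.List.sorted pairs (fun p => p.1) false).foldl
      (fun d p => if p.1 ∈ d.getD p.2 [] then d else d.modify p.2 [] (· ++ [p.1])) result
  result.items

-- ===== PRECONDITION & SPEC =====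
def Spec_get_families (person_to_friends : List (String × List String)) (out : List (String × List String)) : Prop := out = get_families_alt person_to_friends
instance (person_to_friends : List (String × List String)) (out : List (String × List String)) : Decidable (Spec_get_families person_to_friends out) := by unfold Spec_get_families; infer_instance

-- ===== CLAIM (what is proved, stated in full; the proofs are below) =====
def Claim_equal_get_families : Prop := ∀ (person_to_friends : List (String × List String)), Dom_get_families person_to_friends → Spec_get_families person_to_friends (get_families person_to_friends)

-- ===== LEMMAS AND PROOFS =====

-- proof-side abbreviations
def pvStepA (d : PySem.Dict String (List String)) (p : String × String) : PySem.Dict String (List String) :=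
  create_key_value_pairs d p.2 p.1

def pvStepB (d : PySem.Dict String (List String)) (p : String × String) : PySem.Dict String (List String) :=
  if p.1 ∈ d.getD p.2 [] then d else d.modify p.2 [] (· ++ [p.1])

def pvStepK (d : PySem.Dict String (List String)) (p : String × String) : PySem.Dict String (List String) :=
  if d.contains p.2 then d else d.insert p.2 []

def pvAcc (v : List String) (xs : List String) : List String :=
  xs.foldl (fun acc f => if f ∈ acc then acc else acc ++ [f]) v

def pvFns (k : String) (ps : List (String × String)) : List String :=
  (ps.filter (fun p => p.2 == k)).map (·.1)

def pvMkd (K : List String) (g : String → List String) : PySem.Dict String (List String) :=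
  PySem.Dict.mk (K.map fun k => (k, g k))

theorem pvMkd_items (K : List String) (g : String → List String) :
    (pvMkd K g).items = K.map fun k => (k, g k) := rfl

theorem pvMkd_keys (K : List String) (g : String → List String) :
    (pvMkd K g).keys = K := by
  simp [PySem.Dict.keys, pvMkd_items, Function.comp_def]

theorem pvMkd_contains (K : List String) (g : String → List String) (k : String) :
    (pvMkd K g).contains k = decide (k ∈ K) := by
  rw [PySem.Dict.contains_eq_decide_mem_keys, pvMkd_keys]

theorem pvMkd_congr (K : List String) (g g' : String → List String)
    (h : ∀ k ∈ K, g k = g' k) : pvMkd K g = pvMkd K g' := by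
  apply PySem.Dict.ext
  rw [pvMkd_items, pvMkd_items]
  exact List.map_congr_left fun k hk => by rw [h k hk]

theorem pvMkd_getD (K : List String) (g : String → List String) (k : String)
    (hK : K.Nodup) (hk : k ∈ K) : (pvMkd K g).getD k [] = g k := by
  refine PySem.Dict.getD_of_mem_items _ ?_ ?_ []
  · exact List.mem_map.mpr ⟨k, hk, rfl⟩
  · rw [pvMkd_keys]; exact hK

theorem pvMkd_insert_not_mem (K : List String) (g : String → List String) (k : String)
    (v : List String) (hk : k ∉ K) :
    (pvMkd K g).insert k v = pvMkd (K ++ [k]) (fun j => if j = k then v else g j) := by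
  apply PySem.Dict.ext
  rw [PySem.Dict.items_insert_of_not_contains _ _ (by rw [pvMkd_contains]; simpa using hk)]
  rw [pvMkd_items, pvMkd_items, List.map_append]
  refine congrArg₂ _ (List.map_congr_left fun j hj => ?_) (by simp)
  have : j ≠ k := fun h => hk (h ▸ hj)
  simp [this]

theorem pvMkd_insert_mem (K : List String) (g : String → List String) (k : String)
    (v : List String) (hk : k ∈ K) :
    (pvMkd K g).insert k v = pvMkd K (fun j => if j = k then v else g j) := by
  apply PySem.Dict.ext
  rw [PySem.Dict.items_insert_of_contains _ _ (by rw [pvMkd_contains]; simpa using hk)]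
  rw [pvMkd_items, pvMkd_items, List.map_map]
  refine List.map_congr_left fun j _ => ?_
  by_cases h : j = k <;> simp [h]

-- the A-side loop, fully characterised over an arbitrary nodup key table
theorem pvFns_cons_self (f l : String) (rest : List (String × String)) :
    pvFns l ((f, l) :: rest) = f :: pvFns l rest := by
  simp [pvFns]

theorem pvFns_cons_ne (f l k : String) (rest : List (String × String)) (h : l ≠ k) :
    pvFns k ((f, l) :: rest) = pvFns k rest := by
  simp [pvFns, h]

theorem pvAcc_cons_mem (f : String) (v xs : List String) (h : f ∈ v) :
    pvAcc v (f :: xs) = pvAcc v xs := by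
  simp [pvAcc, h]

theorem pvAcc_cons_not_mem (f : String) (v xs : List String) (h : f ∉ v) :
    pvAcc v (f :: xs) = pvAcc (v ++ [f]) xs := by
  simp [pvAcc, h]

theorem pvFoldA (ps : List (String × String)) : ∀ (K : List String) (g : String → List String), K.Nodup →
    ps.foldl pvStepA (pvMkd K g)
      = pvMkd (PySem.Set.update K (ps.map (·.2)))
          (fun k => pvAcc (if k ∈ K then g k else []) (pvFns k ps)) := by
  induction ps with
  | nil => intro K g hK; exact pvMkd_congr _ _ _ (fun k hk => by simp [hk, pvFns, pvAcc])
  | cons p rest ih =>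
    obtain ⟨f, l⟩ := p
    intro K g hK
    by_cases hm : l ∈ K
    · have h2 : PySem.Set.update K (((f, l) :: rest).map (·.2)) = PySem.Set.update K (rest.map (·.2)) := by
        show PySem.Set.update (PySem.Set.add K l) _ = _
        rw [PySem.Set.add_of_mem hm]
      by_cases hf : f ∈ g l
      · have h1 : pvStepA (pvMkd K g) (f, l) = pvMkd K g := by
          have hc : (decide (l ∈ K)) = true := by simpa using hm
          simp only [pvStepA, create_key_value_pairs, pvMkd_contains]
          rw [if_pos hc, pvMkd_getD K g l hK hm, if_pos hf]
        rw [List.foldl_cons, h1, ih K g hK, h2]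
        refine pvMkd_congr _ _ _ fun k hk => ?_
        by_cases hkl : k = l
        · subst hkl
          rw [pvFns_cons_self, if_pos hm, pvAcc_cons_mem _ _ _ hf]
        · rw [pvFns_cons_ne _ _ _ _ (fun h => hkl h.symm)]
      · have h1 : pvStepA (pvMkd K g) (f, l)
            = pvMkd K (fun j => if j = l then g l ++ [f] else g j) := by
          have hc : (decide (l ∈ K)) = true := by simpa using hm
          simp only [pvStepA, create_key_value_pairs, pvMkd_contains]
          rw [if_pos hc, pvMkd_getD K g l hK hm, if_neg hf]
          show (pvMkd K g).insert l ((pvMkd K g).getD l [] ++ [f]) = _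
          rw [pvMkd_getD K g l hK hm, pvMkd_insert_mem K g l _ hm]
        rw [List.foldl_cons, h1, ih K _ hK, h2]
        refine pvMkd_congr _ _ _ fun k hk => ?_
        by_cases hkl : k = l
        · subst hkl
          rw [pvFns_cons_self, if_pos hm, if_pos hm, if_pos rfl,
            pvAcc_cons_not_mem _ _ _ hf]
        · rw [pvFns_cons_ne _ _ _ _ (fun h => hkl h.symm), if_neg hkl]
    · have hK' : (K ++ [l]).Nodup :=
        hK.append (List.nodup_singleton _) (by simpa [List.disjoint_singleton] using hm)
      have hml : l ∈ K ++ [l] := by simp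
      have h2 : PySem.Set.update K (((f, l) :: rest).map (·.2)) = PySem.Set.update (K ++ [l]) (rest.map (·.2)) := by
        show PySem.Set.update (PySem.Set.add K l) _ = _
        rw [PySem.Set.add_of_not_mem hm]
      have h1 : pvStepA (pvMkd K g) (f, l)
          = pvMkd (K ++ [l]) (fun j => if j = l then [f] else g j) := by
        have hc : ¬ ((decide (l ∈ K)) = true) := by simpa using hm
        simp only [pvStepA, create_key_value_pairs, pvMkd_contains]
        rw [if_neg hc, pvMkd_insert_not_mem K g l [] hm]
        rw [pvMkd_getD _ _ l hK' hml, if_pos rfl, if_neg (List.not_mem_nil)]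
        show (pvMkd (K ++ [l]) _).insert l ((pvMkd (K ++ [l]) _).getD l [] ++ [f]) = _
        rw [pvMkd_getD _ _ l hK' hml, if_pos rfl, pvMkd_insert_mem _ _ l _ hml]
        exact pvMkd_congr _ _ _ fun k hk => by by_cases hkl : k = l <;> simp [hkl]
      rw [List.foldl_cons, h1, ih _ _ hK', h2]
      refine pvMkd_congr _ _ _ fun k hk => ?_
      by_cases hkl : k = l
      · subst hkl
        rw [pvFns_cons_self, if_pos hml, if_pos rfl, if_neg hm,
          pvAcc_cons_not_mem _ _ _ (List.not_mem_nil), List.nil_append]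
      · rw [pvFns_cons_ne _ _ _ _ (fun h => hkl h.symm), if_neg hkl]
        by_cases hkK : k ∈ K
        · rw [if_pos hkK, if_pos (by simp [hkK])]
        · rw [if_neg hkK, if_neg (by simp [hkK, hkl])]

theorem pvFoldK (ps : List (String × String)) : ∀ (K : List String) (g : String → List String), K.Nodup →
    ps.foldl pvStepK (pvMkd K g)
      = pvMkd (PySem.Set.update K (ps.map (·.2))) (fun k => if k ∈ K then g k else []) := by
  induction ps with
  | nil => intro K g hK; exact pvMkd_congr _ _ _ (fun k hk => by simp [hk])
  | cons p rest ih =>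
    intro K g hK
    by_cases hm : p.2 ∈ K
    · have h1 : pvStepK (pvMkd K g) p = pvMkd K g := by
        simp [pvStepK, pvMkd_contains, hm]
      have h2 : PySem.Set.update K ((p :: rest).map (·.2)) = PySem.Set.update K (rest.map (·.2)) := by
        show PySem.Set.update (PySem.Set.add K p.2) _ = _
        rw [PySem.Set.add_of_mem hm]
      rw [List.foldl_cons, h1, ih K g hK, h2]
    · have h1 : pvStepK (pvMkd K g) p
          = pvMkd (K ++ [p.2]) (fun j => if j = p.2 then [] else g j) := by
        simp only [pvStepK, pvMkd_contains, hm]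
        simp [pvMkd_insert_not_mem K g p.2 [] hm]
      have hK' : (K ++ [p.2]).Nodup :=
        hK.append (List.nodup_singleton _) (by simpa [List.disjoint_singleton] using hm)
      have h2 : PySem.Set.update K ((p :: rest).map (·.2)) = PySem.Set.update (K ++ [p.2]) (rest.map (·.2)) := by
        show PySem.Set.update (PySem.Set.add K p.2) _ = _
        rw [PySem.Set.add_of_not_mem hm]
      rw [List.foldl_cons, h1, ih _ _ hK', h2]
      refine pvMkd_congr _ _ _ fun k hk => ?_
      by_cases hkK : k ∈ K
      · have : k ≠ p.2 := fun h => hm (h ▸ hkK)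
        simp [hkK, this]
      · by_cases hkp : k = p.2 <;> simp [hkK, hkp, hm]

theorem pvFoldB (ps : List (String × String)) : ∀ (K : List String) (g : String → List String), K.Nodup →
    (∀ p ∈ ps, p.2 ∈ K) →
    ps.foldl pvStepB (pvMkd K g) = pvMkd K (fun k => pvAcc (g k) (pvFns k ps)) := by
  induction ps with
  | nil => intro K g hK _; exact pvMkd_congr _ _ _ (fun k hk => by simp [pvFns, pvAcc])
  | cons p rest ih =>
    obtain ⟨f, l⟩ := p
    intro K g hK hmem
    have hm : l ∈ K := hmem (f, l) (by simp)
    by_cases hf : f ∈ g l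
    · have h1 : pvStepB (pvMkd K g) (f, l) = pvMkd K g := by
        simp only [pvStepB]
        rw [pvMkd_getD K g l hK hm, if_pos hf]
      rw [List.foldl_cons, h1, ih K g hK (fun q hq => hmem q (by simp [hq]))]
      refine pvMkd_congr _ _ _ fun k hk => ?_
      by_cases hkl : k = l
      · subst hkl; rw [pvFns_cons_self, pvAcc_cons_mem _ _ _ hf]
      · rw [pvFns_cons_ne _ _ _ _ (fun h => hkl h.symm)]
    · have h1 : pvStepB (pvMkd K g) (f, l)
          = pvMkd K (fun j => if j = l then g l ++ [f] else g j) := by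
        simp only [pvStepB]
        rw [pvMkd_getD K g l hK hm, if_neg hf]
        show (pvMkd K g).insert l ((pvMkd K g).getD l [] ++ [f]) = _
        rw [pvMkd_getD K g l hK hm, pvMkd_insert_mem K g l _ hm]
      rw [List.foldl_cons, h1, ih K _ hK (fun q hq => hmem q (by simp [hq]))]
      refine pvMkd_congr _ _ _ fun k hk => ?_
      by_cases hkl : k = l
      · subst hkl; rw [pvFns_cons_self, if_pos rfl, pvAcc_cons_not_mem _ _ _ hf]
      · rw [pvFns_cons_ne _ _ _ _ (fun h => hkl h.symm), if_neg hkl]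

theorem pvAcc_eq_dedup (xs : List String) : pvAcc [] xs = PySem.List.dedup xs := by
  have hf : (fun (acc : List String) f => if f ∈ acc then acc else acc ++ [f]) = PySem.Set.add := by
    funext acc f
    rw [PySem.Set.add_eq_ite]
  rw [pvAcc, hf, PySem.List.dedup_eq_ofList, PySem.Set.ofList_eq_foldl]

theorem pvFoldlAdd_sublist (Y : List String) :
    ∀ acc : List String, (List.foldl PySem.Set.add acc Y).Sublist (acc ++ Y) := by
  induction Y with
  | nil => simp
  | cons y Y ih =>
    intro acc
    refine (ih (PySem.Set.add acc y)).trans ?_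
    rw [PySem.Set.add_eq_ite]
    split_ifs with h
    · exact List.Sublist.append_left (by simp) acc
    · simp

theorem pvDedup_sublist (Y : List String) : (PySem.List.dedup Y).Sublist Y := by
  rw [PySem.List.dedup_eq_ofList, PySem.Set.ofList_eq_foldl]
  simpa using pvFoldlAdd_sublist Y []

-- the per-key fact: filling a bucket in firstname-sorted order yields the sorted bucket
theorem pvKeyGoal (k : String) (P : List (String × String)) :
    PySem.List.sorted (pvAcc [] (pvFns k P)) (fun x => x) false
      = pvAcc [] (pvFns k (PySem.List.sorted P (fun p => p.1) false)) := by
  rw [pvAcc_eq_dedup, pvAcc_eq_dedup]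
  apply PySem.List.sorted_eq_of_perm_of_pairwise_lt
  · refine List.perm_of_nodup_nodup_toFinset_eq (PySem.List.nodup_dedup _) (PySem.List.nodup_dedup _) ?_
    ext x
    simp only [List.mem_toFinset, PySem.List.mem_dedup, pvFns, List.mem_map, List.mem_filter,
      PySem.List.mem_sorted]
  · have h1 : (pvFns k (PySem.List.sorted P (fun p => p.1) false)).Pairwise (· ≤ ·) := by
      rw [pvFns, List.pairwise_map]
      exact (PySem.List.sorted_pairwise P (fun p => p.1)).filter _
    have h2 := List.Pairwise.sublist (pvDedup_sublist _) h1
    have h3 : (PySem.List.dedup (pvFns k (PySem.List.sorted P (fun p => p.1) false))).Pairwise (· ≠ ·) :=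
      PySem.List.nodup_dedup _
    exact (h2.and h3).imp fun hab => lt_of_le_of_ne hab.1 hab.2

theorem pvSortValues_mkd (K : List String) (g : String → List String) :
    sort_values (pvMkd K g) = pvMkd K (fun k => PySem.List.sorted (g k) (fun x => x) false) := by
  apply PySem.Dict.ext
  simp [sort_values, pvMkd_items]

theorem pvFlatten (ptf : List (String × List String)) (acc : List String) :
    ptf.foldl (fun acc pr => (acc ++ [pr.1]) ++ pr.2) acc
      = acc ++ ptf.flatMap (fun pr => pr.1 :: pr.2) := by
  induction ptf generalizing acc with
  | nil => simp
  | cons pr t ih => simp [List.flatMap_def]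

theorem pvFoldA_flat (ptf : List (String × List String)) :
    ∀ d : PySem.Dict String (List String),
    ptf.foldl (fun d pr =>
        let fl := pvSplitName pr.1
        let d := create_key_value_pairs d fl.2 fl.1
        pr.2.foldl (fun d friend =>
            let fl2 := pvSplitName friend
            create_key_value_pairs d fl2.2 fl2.1) d) d
      = ((ptf.flatMap (fun pr => pr.1 :: pr.2)).map pvSplitName).foldl pvStepA d := by
  induction ptf with
  | nil => intro d; rfl
  | cons pr t ih =>
    intro d
    rw [List.foldl_cons, ih, List.flatMap_cons, List.map_append, List.foldl_append]
    simp [List.foldl_map, pvStepA]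

theorem pvUpdate_nil (xs : List String) : PySem.Set.update [] xs = PySem.Set.ofList xs := by
  rw [PySem.Set.ofList_eq_foldl]; rfl

theorem pvMain (ptf : List (String × List String)) :
    get_families ptf = get_families_alt ptf := by
  have hempty : (PySem.Dict.empty : PySem.Dict String (List String)) = pvMkd [] (fun _ => []) := rfl
  have hA : get_families ptf
      = (pvMkd (PySem.Set.ofList ((((ptf.flatMap (fun pr => pr.1 :: pr.2)).map pvSplitName)).map (·.2)))
          (fun k => PySem.List.sorted (pvAcc [] (pvFns k ((ptf.flatMap (fun pr => pr.1 :: pr.2)).map pvSplitName))) (fun x => x) false)).items := by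
    simp only [get_families]
    rw [pvFoldA_flat, hempty, pvFoldA _ [] _ List.nodup_nil, pvUpdate_nil, pvSortValues_mkd]
    exact congrArg _ (pvMkd_congr _ _ _ fun k _ => by simp)
  have hB : get_families_alt ptf
      = (pvMkd (PySem.Set.ofList ((((ptf.flatMap (fun pr => pr.1 :: pr.2)).map pvSplitName)).map (·.2)))
          (fun k => pvAcc [] (pvFns k (PySem.List.sorted ((ptf.flatMap (fun pr => pr.1 :: pr.2)).map pvSplitName) (fun p => p.1) false)))).items := by
    simp only [get_families_alt]
    rw [pvFlatten ptf [], List.nil_append,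
      PySem.List.foldl_append_singleton_eq_map pvSplitName _ [], List.nil_append]
    rw [show (fun (d : PySem.Dict String (List String)) (p : String × String) =>
          if d.contains p.2 then d else d.insert p.2 []) = pvStepK from rfl]
    rw [show (fun (d : PySem.Dict String (List String)) (p : String × String) =>
          if p.1 ∈ d.getD p.2 [] then d else d.modify p.2 [] (· ++ [p.1])) = pvStepB from rfl]
    rw [hempty, pvFoldK _ [] _ List.nodup_nil, pvUpdate_nil]
    rw [pvFoldB _ _ _ (PySem.Set.nodup_ofList _) (fun p hp =>
      (PySem.Set.mem_ofList _ _).mpr (List.mem_map.mpr ⟨p, (PySem.List.mem_sorted _ _ _ _).mp hp, rfl⟩))]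
    exact congrArg _ (pvMkd_congr _ _ _ fun k _ => by simp)
  rw [hA, hB]
  exact congrArg _ (pvMkd_congr _ _ _ fun k _ => pvKeyGoal k _)

-- ===== VERDICT (by name: the statement is the Claim_ definition above) =====
theorem get_families_spec : Claim_equal_get_families := by
  intro ptf _
  exact pvMain ptf
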